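-- pv_equiv track=rewrite | github.com/Misskesite/Leetcode | 532kthDifferentpair.py | kthDifferent
-- ===== SOURCE A (Python) =====
-- import collections
--
-- def kthDifferent(nums,k):
--     answer = 0
--     counter = collections.Counter(nums)
--     for num in set(nums):
--         if k >0 and num+k in counter:
--             answer += 1
--         if k == 0 and counter[num] > 1:
--             answer += 1
--     return answer
-- ===== SOURCE B (Python) =====
-- def kthDifferent(nums, k):
--     if k < 0:
--         return 0
--     if k == 0:
--         t = sorted(nums)
--         cnt = 0
--         i = 0
--         while i + 1 < len(t):
--             if t[i] == t[i + 1]: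
--                 cnt += 1
--                 while i + 1 < len(t) and t[i] == t[i + 1]:
--                     i += 1
--             else:
--                 i += 1
--         return cnt
--     s = sorted(set(nums))
--     shifted = [x + k for x in s]
--     i = j = cnt = 0
--     while i < len(shifted) and j < len(s):
--         if shifted[i] == s[j]:
--             cnt += 1
--             i += 1
--             j += 1
--         elif shifted[i] < s[j]:
--             i += 1
--         else:
--             j += 1
--     return cnt
-- ===== Notes on version B (the rewrite author's own statement) =====
-- stated objective: alternative
-- what changed: Replaces A's Counter/hash-set membership loop over set(nums) by a sort-based algorithm: for k>0 a two-pointer merge between the sorted unique values and their k-shifted copy, for k==0 a linear run-scan of the sorted list counting runs of length >= 2, and an early 0 for k<0.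
import Mathlib
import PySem

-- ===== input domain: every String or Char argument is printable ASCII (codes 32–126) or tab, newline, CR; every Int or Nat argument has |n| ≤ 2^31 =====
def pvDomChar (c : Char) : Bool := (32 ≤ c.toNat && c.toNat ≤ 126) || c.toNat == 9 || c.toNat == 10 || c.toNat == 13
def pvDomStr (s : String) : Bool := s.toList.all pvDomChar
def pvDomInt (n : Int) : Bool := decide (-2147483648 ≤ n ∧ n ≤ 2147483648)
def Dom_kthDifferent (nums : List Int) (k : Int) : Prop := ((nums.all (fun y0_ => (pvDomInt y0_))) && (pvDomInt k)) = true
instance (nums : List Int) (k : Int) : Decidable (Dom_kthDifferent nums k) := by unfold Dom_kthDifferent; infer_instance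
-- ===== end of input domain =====

-- B replaces A's Counter/hash-set membership loop by a sort-based algorithm: for k>0 a two-pointer
-- merge between the sorted unique values and their k-shift, for k==0 a run-scan of the sorted list
-- counting runs of length >= 2; an alternative strategy of comparable cost.


-- ===== PORT A =====
def kthDifferent (nums : List Int) (k : Int) : Int :=
  let counter := PySem.Dict.counter nums
  (PySem.Set.ofList nums).foldl
    (fun answer num =>
      let answer := if k > 0 ∧ counter.contains (num + k) then answer + 1 else answer
      if k = 0 ∧ counter.getD num 0 > 1 then answer + 1 else answer)
    0

-- ===== PORT B =====
-- inner 'while i + 1 < len(t) and t[i] == t[i+1]: i += 1' — skip the rest of the current run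
def pvSkipRun (a : Int) : List Int → List Int
  | [] => []
  | b :: rest => if b = a then pvSkipRun a rest else b :: rest

lemma pvSkipRun_length_le (a : Int) (l : List Int) : (pvSkipRun a l).length ≤ l.length := by
  induction l with
  | nil => simp [pvSkipRun]
  | cons b rest ih =>
      simp only [pvSkipRun]
      split
      · exact Nat.le_succ_of_le ih
      · exact Nat.le_refl _

-- outer while loop of B's k == 0 branch: count runs of equal adjacent values
def pvDupRuns : List Int → Int
  | [] => 0
  | [_] => 0
  | a :: b :: rest =>
      if a = b then 1 + pvDupRuns (pvSkipRun a rest)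
      else pvDupRuns (b :: rest)
termination_by l => l.length
decreasing_by
  · have := pvSkipRun_length_le a rest
    simp only [List.length_cons]
    omega
  · simp

-- two-pointer merge of B's k > 0 branch
def pvMergeCnt : List Int → List Int → Int
  | [], _ => 0
  | _ :: _, [] => 0
  | a :: as, b :: bs =>
      if a = b then 1 + pvMergeCnt as bs
      else if a < b then pvMergeCnt as (b :: bs)
      else pvMergeCnt (a :: as) bs
termination_by as bs => as.length + bs.length
decreasing_by all_goals (simp only [List.length_cons]; omega)

def kthDifferent_alt (nums : List Int) (k : Int) : Int :=
  if k < 0 then 0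
  else if k = 0 then pvDupRuns (PySem.List.sorted nums (fun x => x) false)
  else
    let s := PySem.List.sorted (PySem.Set.ofList nums) (fun x => x) false
    let shifted := s.map (fun x => x + k)
    pvMergeCnt shifted s

-- ===== PRECONDITION & SPEC =====
def Spec_kthDifferent (nums : List Int) (k : Int) (out : Int) : Prop := out = kthDifferent_alt nums k
instance (nums : List Int) (k : Int) (out : Int) : Decidable (Spec_kthDifferent nums k out) := by unfold Spec_kthDifferent; infer_instance

-- ===== CLAIM (what is proved, stated in full; the proofs are below) =====
def Claim_equal_kthDifferent : Prop := ∀ (nums : List Int) (k : Int), Dom_kthDifferent nums k → Spec_kthDifferent nums k (kthDifferent nums k)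

-- ===== LEMMAS AND PROOFS =====

-- A's loop is a no-op when k < 0 (both branch guards are false).
lemma foldA_of_neg (nums : List Int) (k : Int) (hk : k < 0) (l : List Int) (a : Int) :
    l.foldl
      (fun answer num =>
        let answer := if k > 0 ∧ (PySem.Dict.counter nums).contains (num + k) then answer + 1 else answer
        if k = 0 ∧ (PySem.Dict.counter nums).getD num 0 > 1 then answer + 1 else answer)
      a = a := by
  induction l generalizing a with
  | nil => rfl
  | cons x t ih =>
      show List.foldl _ (if k = 0 ∧ _ then _ else _) t = a
      rw [if_neg (by omega), if_neg (by omega)]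
      exact ih a

-- For k = 0, A's loop counts the values occurring at least twice in nums.
lemma foldA_of_zero (nums l : List Int) (a : Int) :
    l.foldl
      (fun answer num =>
        let answer := if (0:Int) > 0 ∧ (PySem.Dict.counter nums).contains (num + 0) then answer + 1 else answer
        if (0:Int) = 0 ∧ (PySem.Dict.counter nums).getD num 0 > 1 then answer + 1 else answer)
      a = a + (l.countP (fun num => decide (2 ≤ nums.count num)) : Int) := by
  have hstep : (fun (answer : Int) num =>
      let answer := if (0:Int) > 0 ∧ (PySem.Dict.counter nums).contains (num + 0) = true then answer + 1 else answer
      if (0:Int) = 0 ∧ (PySem.Dict.counter nums).getD num 0 > 1 then answer + 1 else answer)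
      = (fun (answer : Int) num => if 2 ≤ nums.count num then answer + 1 else answer) := by
    funext a n
    show (if (0:Int) = 0 ∧ (PySem.Dict.counter nums).getD n 0 > 1 then
        (if (0:Int) > 0 ∧ (PySem.Dict.counter nums).contains (n + 0) = true then a + 1 else a) + 1
      else (if (0:Int) > 0 ∧ (PySem.Dict.counter nums).contains (n + 0) = true then a + 1 else a)) = _
    rw [if_neg (show ¬((0:Int) > 0 ∧ (PySem.Dict.counter nums).contains (n + 0) = true) from
      fun h => absurd h.1 (by omega))]
    refine if_congr ?_ rfl rfl
    rw [PySem.Dict.getD_counter]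
    constructor
    · intro h; exact_mod_cast h.2
    · intro h; exact ⟨rfl, by exact_mod_cast h⟩
  rw [hstep, PySem.List.foldl_ite_add_one (fun num => 2 ≤ nums.count num)]

-- For k > 0, A's loop counts the distinct values v with v + k present in nums.
lemma foldA_of_pos (nums : List Int) (k : Int) (hk : 0 < k) (l : List Int) (a : Int) :
    l.foldl
      (fun answer num =>
        let answer := if k > 0 ∧ (PySem.Dict.counter nums).contains (num + k) then answer + 1 else answer
        if k = 0 ∧ (PySem.Dict.counter nums).getD num 0 > 1 then answer + 1 else answer)
      a = a + (l.countP (fun num => nums.contains (num + k)) : Int) := by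
  have hstep : (fun (answer : Int) num =>
      let answer := if k > 0 ∧ (PySem.Dict.counter nums).contains (num + k) = true then answer + 1 else answer
      if k = 0 ∧ (PySem.Dict.counter nums).getD num 0 > 1 then answer + 1 else answer)
      = (fun (answer : Int) num => if nums.contains (num + k) = true then answer + 1 else answer) := by
    funext a n
    show (if k = 0 ∧ (PySem.Dict.counter nums).getD n 0 > 1 then
        (if k > 0 ∧ (PySem.Dict.counter nums).contains (n + k) = true then a + 1 else a) + 1
      else (if k > 0 ∧ (PySem.Dict.counter nums).contains (n + k) = true then a + 1 else a)) = _
    rw [if_neg (fun h => absurd h.1 (by omega))]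
    refine if_congr ?_ rfl rfl
    rw [PySem.Dict.contains_counter]
    constructor
    · exact And.right
    · exact fun h => ⟨hk, h⟩
  rw [hstep, PySem.List.foldl_if_add_one (fun num => nums.contains (num + k))]

-- Two duplicate-free lists with the same members have the same length.
lemma length_eq_of_nodup_of_mem_iff {l₁ l₂ : List Int} (h₁ : l₁.Nodup) (h₂ : l₂.Nodup)
    (h : ∀ x, x ∈ l₁ ↔ x ∈ l₂) : l₁.length = l₂.length :=
  ((List.perm_ext_iff_of_nodup h₁ h₂).2 h).length_eq

-- pvSkipRun on a sorted tail removes exactly the leading copies of a, leaving elements > a.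
lemma pvSkipRun_spec (a : Int) (l : List Int) (h : (a :: l).Pairwise (· ≤ ·)) :
    ∃ m, l = List.replicate m a ++ pvSkipRun a l ∧ ∀ x ∈ pvSkipRun a l, a < x := by
  induction l with
  | nil => exact ⟨0, by simp [pvSkipRun]⟩
  | cons b l' ih =>
      by_cases hb : b = a
      · subst hb
        have h' : (b :: l').Pairwise (· ≤ ·) := (List.pairwise_cons.1 h).2
        obtain ⟨m, hm, hgt⟩ := ih h'
        exact ⟨m + 1, by simpa [pvSkipRun, List.replicate_succ] using hm,
          by simpa [pvSkipRun] using hgt⟩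
      · refine ⟨0, by simp [pvSkipRun, hb], ?_⟩
        have hab : a ≤ b := (List.pairwise_cons.1 h).1 b (by simp)
        have hlt : a < b := lt_of_le_of_ne hab (fun e => hb e.symm)
        intro x hx
        simp only [pvSkipRun, if_neg hb] at hx
        rcases List.mem_cons.1 hx with rfl | hx'
        · exact hlt
        · exact lt_of_lt_of_le hlt ((List.pairwise_cons.1 ((List.pairwise_cons.1 h).2)).1 x hx')

-- B's run-scan on a sorted list counts the distinct values occurring at least twice.
lemma dupRuns_eq (n : Nat) : ∀ t : List Int, t.length ≤ n → t.Pairwise (· ≤ ·) →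
    pvDupRuns t = ((PySem.Set.ofList t).countP (fun x => decide (2 ≤ t.count x)) : Int) := by
  induction n with
  | zero =>
      intro t ht _
      have : t = [] := List.eq_nil_of_length_eq_zero (Nat.le_zero.1 ht)
      subst this
      simp [pvDupRuns, PySem.Set.ofList]
  | succ n ih =>
      intro t ht hs
      match t with
      | [] => simp [pvDupRuns, PySem.Set.ofList]
      | [a] => simp [pvDupRuns, PySem.Set.ofList, PySem.Set.add, PySem.Set.contains]
      | a :: b :: rest =>
          by_cases hab : a = b
          · subst hab
            have htail : (a :: rest).Pairwise (· ≤ ·) := (List.pairwise_cons.1 hs).2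
            obtain ⟨m, hm, hgt⟩ := pvSkipRun_spec a rest htail
            set r := pvSkipRun a rest with hr
            have hanr : a ∉ r := fun h => lt_irrefl a (hgt a h)
            have hrs : r.Pairwise (· ≤ ·) := by
              have hrest : rest.Pairwise (· ≤ ·) := (List.pairwise_cons.1 htail).2
              rw [hm] at hrest
              exact hrest.sublist (List.sublist_append_right _ _)
            have hrlen : r.length ≤ n := by
              have h1 := pvSkipRun_length_le a rest
              rw [← hr] at h1
              simp only [List.length_cons] at ht
              omega
            have hcount : ∀ x, x ≠ a → (a :: a :: rest).count x = r.count x := by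
              intro x hx
              rw [hm]
              simp [List.count_append, List.count_replicate, Ne.symm hx]
            have hca : 2 ≤ (a :: a :: rest).count a := by
              simp
            have hrest_of_r : ∀ x ∈ r, x ∈ rest := fun x hx => by
              rw [hm]; exact List.mem_append_right _ hx
            have hsplit : ∀ x ∈ rest, x = a ∨ x ∈ r := by
              intro x hx
              rw [hm] at hx
              rcases List.mem_append.1 hx with h' | h'
              · exact Or.inl (List.eq_of_mem_replicate h')
              · exact Or.inr h'
            rw [show pvDupRuns (a :: a :: rest) = 1 + pvDupRuns r by
              rw [pvDupRuns]; simp [hr]]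
            rw [ih r hrlen hrs]
            have hNat : (PySem.Set.ofList (a :: a :: rest)).countP
                  (fun x => decide (2 ≤ (a :: a :: rest).count x))
                = 1 + (PySem.Set.ofList r).countP (fun x => decide (2 ≤ r.count x)) := by
              rw [List.countP_eq_length_filter, List.countP_eq_length_filter]
              have hlen : ((PySem.Set.ofList (a :: a :: rest)).filter
                    (fun x => decide (2 ≤ (a :: a :: rest).count x))).length
                  = (a :: (PySem.Set.ofList r).filter (fun x => decide (2 ≤ r.count x))).length := by
                apply length_eq_of_nodup_of_mem_iff
                · exact (PySem.Set.nodup_ofList _).filter _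
                · refine List.nodup_cons.2 ⟨?_, (PySem.Set.nodup_ofList _).filter _⟩
                  intro hmemf
                  exact hanr ((PySem.Set.mem_ofList _ _).1 (List.mem_filter.1 hmemf).1)
                · intro x
                  simp only [List.mem_filter, PySem.Set.mem_ofList, List.mem_cons,
                    decide_eq_true_eq]
                  constructor
                  · rintro ⟨hx, hcx⟩
                    rcases hx with rfl | rfl | hx''
                    · exact Or.inl rfl
                    · exact Or.inl rfl
                    · rcases hsplit x hx'' with rfl | hxr
                      · exact Or.inl rfl
                      · refine Or.inr ⟨hxr, ?_⟩
                        have hxa : x ≠ a := fun e => hanr (e ▸ hxr)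
                        rwa [hcount x hxa] at hcx
                  · rintro (rfl | ⟨hxr, hcx⟩)
                    · exact ⟨Or.inl rfl, hca⟩
                    · have hxa : x ≠ a := fun e => hanr (e ▸ hxr)
                      exact ⟨Or.inr (Or.inr (hrest_of_r x hxr)), by rwa [hcount x hxa]⟩
              simpa [List.length_cons, Nat.add_comm] using hlen
            rw [hNat]; push_cast; ring
          · -- a ≠ b: a occurs exactly once in t, so it is not a duplicated value
            have hu : (b :: rest).Pairwise (· ≤ ·) := (List.pairwise_cons.1 hs).2
            have hulen : (b :: rest).length ≤ n := by
              simp only [List.length_cons] at ht ⊢; omega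
            have hab' : a ≤ b := (List.pairwise_cons.1 hs).1 b (by simp)
            have hlt : a < b := lt_of_le_of_ne hab' hab
            have hgt : ∀ x ∈ b :: rest, a < x := by
              intro x hx
              rcases List.mem_cons.1 hx with rfl | hx'
              · exact hlt
              · exact lt_of_lt_of_le hlt ((List.pairwise_cons.1 hu).1 x hx')
            have hanotin : a ∉ b :: rest := fun h => lt_irrefl a (hgt a h)
            have hca : (a :: b :: rest).count a = 1 := by
              have : (b :: rest).count a = 0 := List.count_eq_zero.2 hanotin
              simp [this]
            have hcount : ∀ x, x ≠ a → (a :: b :: rest).count x = (b :: rest).count x := by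
              intro x hx
              simp [List.count_cons, Ne.symm hx]
            rw [show pvDupRuns (a :: b :: rest) = pvDupRuns (b :: rest) by
              rw [pvDupRuns]; simp [hab]]
            rw [ih _ hulen hu]
            congr 1
            rw [List.countP_eq_length_filter, List.countP_eq_length_filter]
            apply length_eq_of_nodup_of_mem_iff
            · exact (PySem.Set.nodup_ofList _).filter _
            · exact (PySem.Set.nodup_ofList _).filter _
            · intro x
              simp only [List.mem_filter, PySem.Set.mem_ofList, decide_eq_true_eq]
              constructor
              · rintro ⟨hx, hcx⟩
                have hxa : x ≠ a := fun e => hanotin (e ▸ hx)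
                exact ⟨List.mem_cons_of_mem _ hx, by rwa [hcount x hxa]⟩
              · rintro ⟨hx, hcx⟩
                rcases List.mem_cons.1 hx with rfl | hx'
                · rw [hca] at hcx; omega
                · have hxa : x ≠ a := fun e => hanotin (e ▸ hx')
                  exact ⟨hx', by rwa [hcount x hxa] at hcx⟩

-- B's two-pointer merge on strictly increasing lists counts the common elements.
lemma mergeCnt_eq (n : Nat) : ∀ as bs : List Int, as.length + bs.length ≤ n →
    as.Pairwise (· < ·) → bs.Pairwise (· < ·) →
    pvMergeCnt as bs = (as.countP (fun x => bs.contains x) : Int) := by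
  induction n with
  | zero =>
      intro as bs h _ _
      have : as = [] := List.eq_nil_of_length_eq_zero (by omega)
      subst this
      simp [pvMergeCnt]
  | succ n ih =>
      intro as bs h ha hb
      match as, bs with
      | [], bs => simp [pvMergeCnt]
      | a :: as', [] => simp [pvMergeCnt]
      | a :: as', b :: bs' =>
          have has' : ∀ x ∈ as', a < x := (List.pairwise_cons.1 ha).1
          have hbs' : ∀ x ∈ bs', b < x := (List.pairwise_cons.1 hb).1
          have hta : as'.Pairwise (· < ·) := (List.pairwise_cons.1 ha).2
          have htb : bs'.Pairwise (· < ·) := (List.pairwise_cons.1 hb).2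
          rcases lt_trichotomy a b with hlt | heq | hgtab
          · rw [show pvMergeCnt (a :: as') (b :: bs') = pvMergeCnt as' (b :: bs') by
              rw [pvMergeCnt]; simp [ne_of_lt hlt, hlt]]
            have hna : a ∉ b :: bs' := by
              intro hmem
              rcases List.mem_cons.1 hmem with rfl | h'
              · exact lt_irrefl a hlt
              · exact absurd (hbs' a h') (by omega)
            rw [List.countP_cons_of_neg (by simp [List.contains_eq_mem, hna])]
            exact ih as' (b :: bs') (by simp only [List.length_cons] at h ⊢; omega) hta hb
          · subst heq
            rw [show pvMergeCnt (a :: as') (a :: bs') = 1 + pvMergeCnt as' bs' by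
              rw [pvMergeCnt]; simp]
            rw [ih as' bs' (by simp only [List.length_cons] at h ⊢; omega) hta htb]
            rw [List.countP_cons_of_pos (by simp)]
            have : as'.countP (fun x => (a :: bs').contains x)
                 = as'.countP (fun x => bs'.contains x) := by
              apply List.countP_congr
              intro x hx
              have hxa : x ≠ a := ne_of_gt (has' x hx)
              simp [List.contains_eq_mem, hxa]
            rw [this]; push_cast; ring
          · rw [show pvMergeCnt (a :: as') (b :: bs') = pvMergeCnt (a :: as') bs' by
              rw [pvMergeCnt]; simp [ne_of_gt hgtab, not_lt_of_gt hgtab]]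
            have : (a :: as').countP (fun x => (b :: bs').contains x)
                 = (a :: as').countP (fun x => bs'.contains x) := by
              apply List.countP_congr
              intro x hx
              have hxb : x ≠ b := by
                rcases List.mem_cons.1 hx with rfl | hx'
                · exact ne_of_gt hgtab
                · exact ne_of_gt (lt_trans hgtab (has' x hx'))
              simp [List.contains_eq_mem, hxb]
            rw [this]
            exact ih (a :: as') bs' (by simp only [List.length_cons] at h ⊢; omega) ha htb

-- ===== VERDICT (by name: the statement is the Claim_ definition above) =====
theorem kthDifferent_spec : Claim_equal_kthDifferent := by
  intro nums k _
  show kthDifferent nums k = kthDifferent_alt nums k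
  unfold kthDifferent kthDifferent_alt
  rcases lt_trichotomy k 0 with hk | hk | hk
  · rw [if_pos hk]
    exact foldA_of_neg nums k hk _ 0
  · subst hk
    rw [if_neg (by omega), if_pos rfl]
    rw [foldA_of_zero, zero_add]
    have hts : (PySem.List.sorted nums (fun x => x) false).Pairwise (· ≤ ·) :=
      PySem.List.sorted_pairwise nums (fun x => x)
    rw [dupRuns_eq (PySem.List.sorted nums (fun x => x) false).length _ le_rfl hts]
    have hperm : (PySem.List.sorted nums (fun x => x) false).Perm nums :=
      PySem.List.sorted_perm nums (fun x => x) false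
    congr 1
    rw [List.countP_eq_length_filter, List.countP_eq_length_filter]
    apply length_eq_of_nodup_of_mem_iff
    · exact (PySem.Set.nodup_ofList _).filter _
    · exact (PySem.Set.nodup_ofList _).filter _
    · intro x
      simp only [List.mem_filter, PySem.Set.mem_ofList, decide_eq_true_eq]
      rw [hperm.mem_iff, hperm.count_eq]
  · rw [if_neg (by omega), if_neg (by omega)]
    rw [foldA_of_pos nums k hk, zero_add]
    show _ = pvMergeCnt ((PySem.List.sorted (PySem.Set.ofList nums) (fun x => x) false).map
      (fun x => x + k)) (PySem.List.sorted (PySem.Set.ofList nums) (fun x => x) false)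
    have hss : (PySem.List.sorted (PySem.Set.ofList nums) (fun x => x) false).Pairwise (· < ·) :=
      PySem.List.sorted_ofList_pairwise_lt nums
    have hms : ((PySem.List.sorted (PySem.Set.ofList nums) (fun x => x) false).map
        (fun x => x + k)).Pairwise (· < ·) :=
      List.Pairwise.map _ (fun a b hab => by omega) hss
    rw [mergeCnt_eq (((PySem.List.sorted (PySem.Set.ofList nums) (fun x => x) false).map
      (fun x => x + k)).length + (PySem.List.sorted (PySem.Set.ofList nums) (fun x => x) false).length)
      _ _ le_rfl hms hss]
    rw [List.countP_map]
    have hperm : (PySem.List.sorted (PySem.Set.ofList nums) (fun x => x) false).Perm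
        (PySem.Set.ofList nums) :=
      PySem.List.sorted_perm _ (fun x => x) false
    rw [← hperm.countP_eq]
    congr 1
    apply List.countP_congr
    intro v hv
    simp only [Function.comp_apply, List.contains_eq_mem, decide_eq_true_eq]
    simp [PySem.List.mem_sorted, PySem.Set.mem_ofList]
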